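-- pv_equiv track=rewrite | github.com/Ibek7/Face-Recognition- | src/ai_optimization.py | _generate_architecture
-- ===== SOURCE A (Python) =====
-- from typing import Dict, List, Tuple, Any, Optional, Callable
--
-- def _generate_architecture(num_layers: int, base_width: int, pattern: str) -> List[int]:
--     """Generate architecture based on pattern."""
--
--     if pattern == 'constant':
--         return [base_width] * num_layers
--     elif pattern == 'decreasing':
--         return [max(base_width // (2 ** i), 32) for i in range(num_layers)]
--     elif pattern == 'increasing':
--         return [min(base_width * (2 ** i), 512) for i in range(num_layers)]
--     elif pattern == 'hourglass':
--         # Decrease then increase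
--         mid = num_layers // 2
--         decreasing = [max(base_width // (2 ** i), 32) for i in range(mid)]
--         increasing = [max(base_width // (2 ** (mid - i - 1)), 32) for i in range(num_layers - mid)]
--         return decreasing + increasing
--     else:
--         return [base_width] * num_layers
-- ===== SOURCE B (Python) =====
-- from typing import List
--
-- def _generate_architecture(num_layers: int, base_width: int, pattern: str) -> List[int]:
--     """Generate architecture based on pattern (running-width recurrence)."""
--     if pattern == 'decreasing':
--         out = []
--         w = base_width
--         for _ in range(num_layers):
--             out.append(max(w, 32))
--             w //= 2
--         return out
--     elif pattern == 'increasing':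
--         out = []
--         w = base_width
--         for _ in range(num_layers):
--             out.append(min(w, 512))
--             w *= 2
--         return out
--     elif pattern == 'hourglass':
--         mid = num_layers // 2
--         down = []
--         w = base_width
--         for _ in range(mid):
--             down.append(max(w, 32))
--             w //= 2
--         up = []
--         w = base_width
--         for _ in range(num_layers - mid):
--             up.append(max(w, 32))
--             w //= 2
--         return down + up[::-1]
--     else:
--         return [base_width] * num_layers
-- ===== Notes on version B (the rewrite author's own statement) =====
-- stated objective: alternative
-- what changed: Each branch is driven by a running width updated by halving/doubling (w //= 2, w *= 2) instead of computing 2**i afresh per element, and the hourglass ascending half is produced by mirroring (reversing) the halving sequence instead of a separate exponent formula.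
-- outside the precondition, e.g. on _generate_architecture(3, 64, 'hourglass'): A returns [64, 64, 128.0], B returns [64, 32, 64]
import Mathlib
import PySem

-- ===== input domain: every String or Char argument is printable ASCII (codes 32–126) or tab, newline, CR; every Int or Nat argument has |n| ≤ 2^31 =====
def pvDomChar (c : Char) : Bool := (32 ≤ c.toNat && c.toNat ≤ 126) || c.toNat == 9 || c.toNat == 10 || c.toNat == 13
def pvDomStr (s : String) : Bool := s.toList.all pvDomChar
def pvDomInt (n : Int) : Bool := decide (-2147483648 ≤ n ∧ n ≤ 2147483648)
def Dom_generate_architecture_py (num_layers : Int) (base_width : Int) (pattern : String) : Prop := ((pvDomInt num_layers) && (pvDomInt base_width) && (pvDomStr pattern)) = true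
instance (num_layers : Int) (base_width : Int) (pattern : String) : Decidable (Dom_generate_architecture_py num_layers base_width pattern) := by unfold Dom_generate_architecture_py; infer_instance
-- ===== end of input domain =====

-- B drives each pattern branch with a running width (halve/double per step) and builds the
-- hourglass ascending half by mirroring the descending sequence, instead of A's per-index 2**i.


-- ===== PORT A =====
-- 2 ** e: the exponent is nonnegative on every input admitted by Pre_, so '.toNat' is exact there
-- (on the excluded odd-hourglass inputs Python produces a float via 2**(-1)).
def generate_architecture_py (num_layers : Int) (base_width : Int) (pattern : String) : List Int :=
  if pattern = "constant" then PySem.List.pyRepeat [base_width] num_layers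
  else if pattern = "decreasing" then
    (PySem.List.pyRange 0 num_layers 1).map
      (fun i => max (PySem.Int.floordiv base_width (2 ^ i.toNat)) 32)
  else if pattern = "increasing" then
    (PySem.List.pyRange 0 num_layers 1).map
      (fun i => min (base_width * 2 ^ i.toNat) 512)
  else if pattern = "hourglass" then
    let mid := PySem.Int.floordiv num_layers 2
    let decreasing := (PySem.List.pyRange 0 mid 1).map
      (fun i => max (PySem.Int.floordiv base_width (2 ^ i.toNat)) 32)
    let increasing := (PySem.List.pyRange 0 (num_layers - mid) 1).map
      (fun i => max (PySem.Int.floordiv base_width (2 ^ (mid - i - 1).toNat)) 32)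
    decreasing ++ increasing
  else PySem.List.pyRepeat [base_width] num_layers

-- ===== PORT B =====
-- the 'for _ in range(n): out.append(max(w,32)); w //= 2' loop of Source B
def pvAltDown (n : Nat) (w : Int) : List Int :=
  match n with
  | 0 => []
  | n + 1 => max w 32 :: pvAltDown n (PySem.Int.floordiv w 2)

-- the 'for _ in range(n): out.append(min(w,512)); w *= 2' loop of Source B
def pvAltUp (n : Nat) (w : Int) : List Int :=
  match n with
  | 0 => []
  | n + 1 => min w 512 :: pvAltUp n (w * 2)

def generate_architecture_py_alt (num_layers : Int) (base_width : Int) (pattern : String) : List Int :=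
  if pattern = "decreasing" then pvAltDown num_layers.toNat base_width
  else if pattern = "increasing" then pvAltUp num_layers.toNat base_width
  else if pattern = "hourglass" then
    let mid := PySem.Int.floordiv num_layers 2
    pvAltDown mid.toNat base_width ++ (pvAltDown (num_layers - mid).toNat base_width).reverse
  else PySem.List.pyRepeat [base_width] num_layers

-- ===== PRECONDITION & SPEC =====
-- Pre_ excludes pattern 'hourglass' with positive odd num_layers: there A evaluates 2**(-1) = 0.5
-- and the last element becomes a Python float, not an int of the declared List[int].
def Pre_generate_architecture_py (num_layers : Int) (base_width : Int) (pattern : String) : Prop :=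
  ¬(pattern = "hourglass" ∧ 1 ≤ num_layers ∧ PySem.Int.mod num_layers 2 = 1)
instance (num_layers : Int) (base_width : Int) (pattern : String) : Decidable (Pre_generate_architecture_py num_layers base_width pattern) := by unfold Pre_generate_architecture_py; infer_instance

def pvWitness_generate_architecture_py : Int × Int × String := (4, 256, "hourglass")

def Spec_generate_architecture_py (num_layers : Int) (base_width : Int) (pattern : String) (out : List Int) : Prop := out = generate_architecture_py_alt num_layers base_width pattern
instance (num_layers : Int) (base_width : Int) (pattern : String) (out : List Int) : Decidable (Spec_generate_architecture_py num_layers base_width pattern out) := by unfold Spec_generate_architecture_py; infer_instance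

-- ===== CLAIM (what is proved, stated in full; the proofs are below) =====
def Claim_equal_generate_architecture_py : Prop := ∀ (num_layers : Int) (base_width : Int) (pattern : String), Dom_generate_architecture_py num_layers base_width pattern → Pre_generate_architecture_py num_layers base_width pattern → Spec_generate_architecture_py num_layers base_width pattern (generate_architecture_py num_layers base_width pattern)

-- ===== LEMMAS AND PROOFS =====

-- floor(floor(w/2)/2^i) = floor(w/2^(i+1))
lemma pv_fdiv_two_pow (w : Int) (i : Nat) :
    PySem.Int.floordiv (PySem.Int.floordiv w 2) (2 ^ i) = PySem.Int.floordiv w (2 ^ (i + 1)) := by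
  rw [PySem.Int.floordiv_eq_ediv_of_pos (a := w) (by norm_num : (0:Int) < 2),
      PySem.Int.floordiv_eq_ediv_of_pos (by positivity : (0:Int) < 2 ^ i),
      PySem.Int.floordiv_eq_ediv_of_pos (by positivity : (0:Int) < 2 ^ (i + 1))]
  rw [Int.ediv_ediv_of_nonneg]
  · congr 1; ring
  · norm_num

lemma pv_down_eq (n : Nat) (w : Int) :
    pvAltDown n w = (List.range n).map (fun i => max (PySem.Int.floordiv w (2 ^ i)) 32) := by
  induction n generalizing w with
  | zero => simp [pvAltDown]
  | succ n ih =>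
    rw [List.range_succ_eq_map]
    simp only [pvAltDown, ih, List.map_cons, List.map_map]
    congr 1
    · simp [pysem]
    · apply List.map_congr_left
      intro k _
      simp only [Function.comp, pv_fdiv_two_pow, Nat.succ_eq_add_one]

lemma pv_up_eq (n : Nat) (w : Int) :
    pvAltUp n w = (List.range n).map (fun i => min (w * 2 ^ i) 512) := by
  induction n generalizing w with
  | zero => simp [pvAltUp]
  | succ n ih =>
    rw [List.range_succ_eq_map]
    simp only [pvAltUp, ih, List.map_cons, List.map_map]
    congr 1
    · simp
    · apply List.map_congr_left
      intro k _
      simp only [Function.comp]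
      congr 1
      rw [pow_succ]
      ring

lemma pv_rev_map_range {α : Type} (f : Nat → α) (m : Nat) :
    ((List.range m).map f).reverse = (List.range m).map (fun i => f (m - 1 - i)) := by
  induction m with
  | zero => simp
  | succ m ih =>
    have L : ((List.range (m + 1)).map f).reverse = f m :: ((List.range m).map f).reverse := by
      rw [List.range_succ]; simp
    have R : (List.range (m + 1)).map (fun i => f (m + 1 - 1 - i))
        = f m :: (List.range m).map (fun i => f (m - 1 - i)) := by
      rw [List.range_succ_eq_map]
      simp only [List.map_cons, List.map_map]
      congr 1
      apply List.map_congr_left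
      intro k _
      simp only [Function.comp]
      congr 1
      omega
    rw [L, R, ih]

-- '[f(i.toNat) for i in range(n)]' over Int indices is a map over List.range n.toNat
lemma pv_map_pyRange_toNat (n : Int) (g : Nat → Int) :
    (PySem.List.pyRange 0 n 1).map (fun i => g i.toNat) = (List.range n.toNat).map g := by
  rw [PySem.List.pyRange_one]
  simp only [List.map_map, Int.sub_zero]
  apply List.map_congr_left
  intro k _
  simp [Function.comp]

theorem generate_architecture_py_spec : Claim_equal_generate_architecture_py := by
  intro n b p _ hpre
  unfold Spec_generate_architecture_py generate_architecture_py generate_architecture_py_alt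
  by_cases hc : p = "constant"
  · subst hc; simp only [String.reduceEq, reduceIte]
  by_cases hd : p = "decreasing"
  · subst hd
    simp only [String.reduceEq, reduceIte]
    rw [pv_map_pyRange_toNat n (fun k => max (PySem.Int.floordiv b (2 ^ k)) 32), pv_down_eq]
  by_cases hi : p = "increasing"
  · subst hi
    simp only [String.reduceEq, reduceIte]
    rw [pv_map_pyRange_toNat n (fun k => min (b * 2 ^ k) 512), pv_up_eq]
  by_cases hh : p = "hourglass"
  · subst hh
    simp only [String.reduceEq, reduceIte]
    by_cases hn : n ≤ 0
    · -- nonpositive num_layers: everything is empty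
      have hmid : PySem.Int.floordiv n 2 ≤ 0 := by
        rw [PySem.Int.floordiv_eq_ediv_of_pos (by norm_num : (0:Int) < 2)]
        omega
      have hrest : n - PySem.Int.floordiv n 2 ≤ 0 := by
        have := PySem.Int.floordiv_mul_add_mod n 2
        have h1 := PySem.Int.mod_nonneg n (by norm_num : (0:Int) < 2)
        have h2 := PySem.Int.mod_lt n (by norm_num : (0:Int) < 2)
        omega
      rw [PySem.List.pyRange_one_eq_nil (by omega), PySem.List.pyRange_one_eq_nil (by omega)]
      have e1 : (PySem.Int.floordiv n 2).toNat = 0 := by omega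
      have e2 : (n - PySem.Int.floordiv n 2).toNat = 0 := by omega
      rw [e1, e2]
      simp [pvAltDown]
    · -- positive num_layers: Pre_ forces it even, so both halves have length n/2
      have hmod : PySem.Int.mod n 2 = 0 := by
        have h1 := PySem.Int.mod_nonneg n (by norm_num : (0:Int) < 2)
        have h2 := PySem.Int.mod_lt n (by norm_num : (0:Int) < 2)
        by_contra hne
        exact hpre ⟨rfl, by omega, by omega⟩
      have hdiv := PySem.Int.floordiv_mul_add_mod n 2
      set m : Int := PySem.Int.floordiv n 2 with hm
      have hmpos : 0 < m := by omega
      have hnm : n - m = m := by omega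
      rw [hnm]
      congr 1
      · rw [pv_map_pyRange_toNat m (fun k => max (PySem.Int.floordiv b (2 ^ k)) 32), pv_down_eq]
      · have hinc : (PySem.List.pyRange 0 m 1).map
            (fun i => max (PySem.Int.floordiv b (2 ^ (m - i - 1).toNat)) 32)
            = (List.range m.toNat).map
              (fun k => max (PySem.Int.floordiv b (2 ^ (m.toNat - 1 - k))) 32) := by
          rw [PySem.List.pyRange_one]
          simp only [List.map_map, Int.sub_zero]
          apply List.map_congr_left
          intro k hk
          rw [List.mem_range] at hk
          simp only [Function.comp]
          congr 3
          omega
        rw [hinc, pv_down_eq, pv_rev_map_range]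
  · simp only [if_neg hc, if_neg hd, if_neg hi, if_neg hh]
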